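-- pv_equiv track=rewrite | github.com/noob6t5/hexbin_dec_assault | convert.py | flip_endian
-- ===== SOURCE A (Python) =====
-- def flip_endian(hexstr, chunk_size_bytes):
--     """
--     Flip endianness of hex string.
--     hexstr: string like '0x1234abcd'
--     chunk_size_bytes: 2 (16bit), 3 (24bit), 4 (32bit)
--     """
--     # Clean hex (strip 0x)
--     h = hexstr[2:] if hexstr.startswith('0x') else hexstr
--     # Pad if necessary (must be even length)
--     if len(h) % 2 != 0:
--         h = '0' + h
--
--     # Split into bytes
--     bytes_list = [h[i:i+2] for i in range(0, len(h), 2)]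
--
--     # Ensure total bytes is divisible by chunk size
--     if len(bytes_list) % chunk_size_bytes != 0:
--         # pad at start with 00 bytes (big endian style)
--         pad_len = chunk_size_bytes - (len(bytes_list) % chunk_size_bytes)
--         bytes_list = ['00'] * pad_len + bytes_list
--
--     # Flip bytes in each chunk
--     flipped_chunks = []
--     for i in range(0, len(bytes_list), chunk_size_bytes):
--         chunk = bytes_list[i:i+chunk_size_bytes]
--         flipped_chunks += chunk[::-1]
--
--     flipped_hex = ''.join(flipped_chunks).lstrip('0')
--     if flipped_hex == '':
--         flipped_hex = '0'
--
--     return '0x' + flipped_hex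
-- ===== SOURCE B (Python) =====
-- def _piece(h, w, i):
--     # right-aligned window ending at i; only the leftmost window can be short
--     # and is right-justified with zeros
--     r = h[max(i - w, 0):i].rjust(w, '0')[::-1]
--     # reversing the window flips the byte order but also each byte's two digits;
--     # swapping adjacent characters restores the digits
--     return ''.join(r[j + 1] + r[j] for j in range(0, w, 2))
--
--
-- def flip_endian(hexstr, chunk_size_bytes):
--     """
--     Flip endianness of hex string.
--     hexstr: string like '0x1234abcd'
--     chunk_size_bytes: 2 (16bit), 3 (24bit), 4 (32bit)
--     """
--     h = hexstr[2:] if hexstr.startswith('0x') else hexstr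
--     w = 2 * chunk_size_bytes
--     # walk the windows from the right end of the unpadded string, back to front
--     pieces = []
--     for i in range(len(h), 0, -w):
--         pieces.append(_piece(h, w, i))
--     s = ''.join(reversed(pieces)).lstrip('0')
--     return '0x' + (s or '0')
-- ===== Notes on version B (the rewrite author's own statement) =====
-- stated objective: alternative
-- what changed: B abandons A's left-to-right pipeline (even-length pad, materialised byte list, modulo-tested '00' list padding, chunk slicing with per-chunk list reversal) and instead walks right-aligned windows from the right end of the unpadded string, right-justifying only the leftmost short window, producing each piece by reversing the whole window and re-swapping adjacent digits, and assembling the output back-to-front.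
import Mathlib
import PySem

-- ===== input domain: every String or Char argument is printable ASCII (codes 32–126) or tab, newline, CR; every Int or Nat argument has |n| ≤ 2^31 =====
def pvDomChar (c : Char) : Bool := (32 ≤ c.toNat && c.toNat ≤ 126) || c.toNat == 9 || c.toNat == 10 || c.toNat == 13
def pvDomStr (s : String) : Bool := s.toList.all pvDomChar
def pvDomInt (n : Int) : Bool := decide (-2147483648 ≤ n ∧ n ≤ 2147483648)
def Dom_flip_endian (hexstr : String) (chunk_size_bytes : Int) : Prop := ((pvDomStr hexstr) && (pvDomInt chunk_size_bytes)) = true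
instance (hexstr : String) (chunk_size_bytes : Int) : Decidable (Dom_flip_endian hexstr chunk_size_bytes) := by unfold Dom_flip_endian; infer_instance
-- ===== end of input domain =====

-- B walks right-aligned windows from the right end (no global padding pass, no byte list),
-- reversing each window and re-swapping adjacent digits, assembling back-to-front
-- (objective: alternative; same asymptotic cost).


-- ===== PORT A =====
-- exact port of Python's s.lstrip('0') (strip the single character '0' from the left)
def pyLstrip0 (l : List Char) : List Char := l.dropWhile (· == '0')

def flip_endian (hexstr : String) (chunk_size_bytes : Int) : String :=
  -- h = hexstr[2:] if hexstr.startswith('0x') else hexstr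
  let l := hexstr.toList
  let h := if PySem.Chars.startswith l ['0', 'x'] then PySem.List.slice l (some 2) none else l
  -- if len(h) % 2 != 0: h = '0' + h
  let h := if PySem.Int.mod (h.length : Int) 2 ≠ 0 then '0' :: h else h
  -- bytes_list = [h[i:i+2] for i in range(0, len(h), 2)]
  let bytesList : List (List Char) :=
    (PySem.List.pyRange 0 (h.length : Int) 2).map
      (fun i => PySem.List.slice h (some i) (some (i + 2)))
  -- if len(bytes_list) % chunk_size_bytes != 0: bytes_list = ['00'] * pad_len + bytes_list
  let bytesList :=
    if PySem.Int.mod (bytesList.length : Int) chunk_size_bytes ≠ 0 then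
      PySem.List.pyRepeat [(['0', '0'] : List Char)]
        (chunk_size_bytes - PySem.Int.mod (bytesList.length : Int) chunk_size_bytes) ++ bytesList
    else bytesList
  -- for i in range(0, len(bytes_list), chunk_size_bytes): flipped_chunks += chunk[::-1]
  -- chunk[::-1] is List.reverse (PySem.List.slice?_none_none_neg_one)
  let flipped : List (List Char) :=
    (PySem.List.pyRange 0 (bytesList.length : Int) chunk_size_bytes).foldl
      (fun acc i =>
        acc ++ (PySem.List.slice bytesList (some i) (some (i + chunk_size_bytes))).reverse) []
  -- flipped_hex = ''.join(flipped_chunks).lstrip('0');  '' -> '0';  return '0x' + flipped_hex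
  let fh := pyLstrip0 (PySem.Chars.join [] flipped)
  String.ofList ('0' :: 'x' :: (if fh = [] then ['0'] else fh))

-- ===== PORT B =====
-- _piece(h, w, i): the flipped right-aligned window ending at i
def pieceOf (h : List Char) (w i : Int) : List Char :=
  -- window.rjust(w, '0') is exactly a left-pad with '0' to length w (no sign rule in rjust);
  -- [::-1] is List.reverse (PySem.List.slice?_none_none_neg_one)
  let window := PySem.List.slice h (some (max (i - w) 0)) (some i)
  let r := (List.replicate (w.toNat - window.length) '0' ++ window).reverse
  -- ''.join(r[j+1] + r[j] for j in range(0, w, 2)); the indices are in range whenever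
  -- the outer loop runs at all (r has length w > 0 then)
  PySem.Chars.join []
    ((PySem.List.pyRange 0 w 2).map
      (fun j => [PySem.List.pyGetD r (j + 1) '0', PySem.List.pyGetD r j '0']))

def flip_endian_alt (hexstr : String) (chunk_size_bytes : Int) : String :=
  -- h = hexstr[2:] if hexstr.startswith('0x') else hexstr
  let l := hexstr.toList
  let h := if PySem.Chars.startswith l ['0', 'x'] then PySem.List.slice l (some 2) none else l
  let w := 2 * chunk_size_bytes
  -- for i in range(len(h), 0, -w): pieces.append(_piece(h, w, i))
  let pieces : List (List Char) :=
    (PySem.List.pyRange (h.length : Int) 0 (-w)).foldl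
      (fun acc i => acc ++ [pieceOf h w i]) []
  -- s = ''.join(reversed(pieces)).lstrip('0');  return '0x' + (s or '0')
  let s := pyLstrip0 (PySem.Chars.join [] pieces.reverse)
  String.ofList ('0' :: 'x' :: (if s = [] then ['0'] else s))

-- ===== PRECONDITION & SPEC =====
-- Pre_ excludes only chunk_size_bytes = 0, where Python A raises ZeroDivisionError ('% 0').
def Pre_flip_endian (hexstr : String) (chunk_size_bytes : Int) : Prop := chunk_size_bytes ≠ 0
instance (hexstr : String) (chunk_size_bytes : Int) : Decidable (Pre_flip_endian hexstr chunk_size_bytes) := by unfold Pre_flip_endian; infer_instance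

def pvWitness_flip_endian : String × Int := ("0x1234abcd", 2)

def Spec_flip_endian (hexstr : String) (chunk_size_bytes : Int) (out : String) : Prop := out = flip_endian_alt hexstr chunk_size_bytes
instance (hexstr : String) (chunk_size_bytes : Int) (out : String) : Decidable (Spec_flip_endian hexstr chunk_size_bytes out) := by unfold Spec_flip_endian; infer_instance

-- ===== CLAIM (what is proved, stated in full; the proofs are below) =====
def Claim_equal_flip_endian : Prop := ∀ (hexstr : String) (chunk_size_bytes : Int), Dom_flip_endian hexstr chunk_size_bytes → Pre_flip_endian hexstr chunk_size_bytes → Spec_flip_endian hexstr chunk_size_bytes (flip_endian hexstr chunk_size_bytes)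

-- ===== LEMMAS AND PROOFS =====

-- chunks of size c (used only with 0 < c): the shape both ports' outputs decompose into
def pvChunks {α : Type} (c : Nat) : List α → List (List α)
  | [] => []
  | a :: t => (a :: t.take (c - 1)) :: pvChunks c (t.drop (c - 1))
termination_by l => l.length
decreasing_by simp

theorem pvChunks_eq_cons {α : Type} {c : Nat} (hc : 0 < c) {l : List α} (hl : l ≠ []) :
    pvChunks c l = l.take c :: pvChunks c (l.drop c) := by
  cases l with
  | nil => exact absurd rfl hl
  | cons a t =>
    obtain ⟨c', rfl⟩ : ∃ c', c = c' + 1 := ⟨c - 1, by omega⟩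
    rw [pvChunks]
    simp

theorem pvChunks_length {α : Type} {c : Nat} (hc : 0 < c) (l : List α) :
    (pvChunks c l).length = (l.length + c - 1) / c := by
  suffices H : ∀ (N : Nat) (l : List α), l.length ≤ N →
      (pvChunks c l).length = (l.length + c - 1) / c from H l.length l le_rfl
  intro N
  induction N with
  | zero =>
    intro l hl
    have hnil : l = [] := by cases l with | nil => rfl | cons a t => simp at hl
    subst hnil
    simp [pvChunks]
    exact (Nat.div_eq_of_lt (by omega)).symm
  | succ N ih =>
    intro l hl
    cases l with
    | nil =>
      simp [pvChunks]
      exact (Nat.div_eq_of_lt (by omega)).symm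
    | cons a t =>
      rw [pvChunks_eq_cons hc (by simp), List.length_cons,
          ih ((a :: t).drop c) (by simp only [List.length_drop, List.length_cons] at hl ⊢; omega)]
      have hdl : ((a :: t).drop c).length = t.length + 1 - c := by
        simp only [List.length_drop, List.length_cons]
      rw [hdl]
      set L := t.length + 1 with hL
      have hrew : L + c - 1 = (L - 1) + c := by omega
      rw [show (a :: t).length = L from by simp [hL], hrew, Nat.add_div_right _ hc]
      rcases Nat.lt_or_ge L c with h | h
      · have e : L - c + c - 1 = c - 1 := by omega
        rw [e, Nat.div_eq_of_lt (by omega), Nat.div_eq_of_lt (by omega)]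
      · have e : L - c + c - 1 = L - 1 := by omega
        rw [e]

theorem pvChunks_getElem {α : Type} {c : Nat} (hc : 0 < c) (l : List α) (i : Nat)
    (hi : i < (pvChunks c l).length) :
    (pvChunks c l)[i] = (l.drop (c * i)).take c := by
  induction i generalizing l with
  | zero =>
    have hl : l ≠ [] := by
      intro h; subst h; simp [pvChunks] at hi
    rw [List.getElem_of_eq (pvChunks_eq_cons hc hl) hi]
    simp
  | succ i ih =>
    have hl : l ≠ [] := by
      intro h; subst h; simp [pvChunks] at hi
    have hi' : i < (pvChunks c (l.drop c)).length := by
      have h2 := hi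
      rw [pvChunks_eq_cons hc hl] at h2
      simpa using h2
    rw [List.getElem_of_eq (pvChunks_eq_cons hc hl) hi]
    simp only [List.getElem_cons_succ]
    rw [ih (l.drop c) hi', List.drop_drop]
    congr 2
    ring

theorem pvChunks_take {α : Type} {c : Nat} (hc : 0 < c) (m : Nat) (l : List α) :
    (pvChunks c l).take m = pvChunks c (l.take (c * m)) := by
  induction m generalizing l with
  | zero => simp [pvChunks]
  | succ m ih =>
    cases l with
    | nil => simp [pvChunks]
    | cons a t =>
      have hs : (a :: t).take (c * (m + 1)) ≠ [] := by
        have h1 : c * (m + 1) ≠ 0 := Nat.mul_ne_zero (by omega) (by omega)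
        simp [List.take_eq_nil_iff, h1]
      rw [pvChunks_eq_cons hc (show (a :: t) ≠ [] by simp), List.take_succ_cons, ih,
          pvChunks_eq_cons hc hs, List.take_take, List.drop_take]
      have e1 : min c (c * (m + 1)) = c :=
        min_eq_left (Nat.le_mul_of_pos_right c (by omega))
      have e2 : c * (m + 1) - c = c * m := by rw [Nat.mul_succ]; omega
      rw [e1, e2]

theorem pvChunks_drop {α : Type} {c : Nat} (hc : 0 < c) (m : Nat) (l : List α) :
    (pvChunks c l).drop m = pvChunks c (l.drop (c * m)) := by
  induction m generalizing l with
  | zero => simp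
  | succ m ih =>
    cases l with
    | nil => simp [pvChunks]
    | cons a t =>
      rw [pvChunks_eq_cons hc (show (a :: t) ≠ [] by simp), List.drop_succ_cons, ih,
          List.drop_drop]
      congr 2
      rw [Nat.mul_succ]
      omega

theorem pvChunks_replicate_zero_pairs (j : Nat) (e : List Char) :
    pvChunks 2 (List.replicate (2 * j) '0' ++ e) = List.replicate j ['0', '0'] ++ pvChunks 2 e := by
  induction j with
  | zero => simp
  | succ j ih =>
    have e1 : List.replicate (2 * (j + 1)) '0' ++ e
        = '0' :: '0' :: (List.replicate (2 * j) '0' ++ e) := by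
      rw [show 2 * (j + 1) = 2 * j + 1 + 1 by ring]
      simp [List.replicate_succ]
    rw [e1, pvChunks_eq_cons (show (0:Nat) < 2 by norm_num) (by simp)]
    simp [ih, List.replicate_succ]

-- [l[i:i+c] for i in range(0, len(l), c)] = pvChunks c l
theorem pvMapSliceRange {α : Type} {c : Nat} (hc : 0 < c) (l : List α) :
    (PySem.List.pyRange 0 (l.length : Int) (c : Int)).map
      (fun i => PySem.List.slice l (some i) (some (i + (c : Int)))) = pvChunks c l := by
  rw [PySem.List.pyRange_of_pos _ _ (show (0:Int) < (c:Int) by exact_mod_cast hc)]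
  have hcount : (if (0:Int) < (l.length : Int) then (((l.length : Int) - 0 + c - 1) / c).toNat else 0)
      = (l.length + c - 1) / c := by
    split
    · rename_i hpos
      have e : ((l.length : Int) - 0 + c - 1) = ((l.length + c - 1 : Nat) : Int) := by
        omega
      rw [e, ← Int.natCast_div]
      exact Int.toNat_natCast _
    · rename_i hneg
      have e : l.length = 0 := by omega
      rw [e, Nat.div_eq_of_lt (by omega)]
  rw [hcount]
  apply List.ext_getElem
  · simp [pvChunks_length hc]
  · intro i h1 h2
    simp only [List.getElem_map, List.getElem_range]
    have e1 : (0 : Int) + (c : Int) * (i : Int) = ((c * i : Nat) : Int) := by push_cast; ring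
    have e2 : ((c * i : Nat) : Int) + (c : Int) = ((c * i : Nat) : Int) + ((c : Nat) : Int) := rfl
    rw [e1, e2, PySem.List.slice_natCast_add, pvChunks_getElem hc l i h2]

-- chunk-of-chunks: flipping byte pairs chunkwise over the byte list = flipping pairwise per window
theorem pvFlatEq {α : Type} {c : Nat} (hc : 0 < c) (p : List α) :
    (pvChunks c (pvChunks 2 p)).flatMap List.reverse
      = (pvChunks (2 * c) p).flatMap (fun u => (pvChunks 2 u).reverse) := by
  suffices H : ∀ (N : Nat) (p : List α), p.length ≤ N →
      (pvChunks c (pvChunks 2 p)).flatMap List.reverse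
        = (pvChunks (2 * c) p).flatMap (fun u => (pvChunks 2 u).reverse) from H p.length p le_rfl
  clear p
  intro N
  induction N with
  | zero =>
    intro p hp
    have hnil : p = [] := by cases p with | nil => rfl | cons a t => simp at hp
    subst hnil
    simp [pvChunks]
  | succ N ih =>
    intro p hp
    cases p with
    | nil => simp [pvChunks]
    | cons a t =>
      have h2c : 0 < 2 * c := by omega
      have hch : pvChunks 2 (a :: t) ≠ [] := by
        rw [pvChunks_eq_cons (show (0:Nat) < 2 by norm_num) (by simp)]
        simp
      rw [pvChunks_eq_cons h2c (show (a :: t) ≠ [] by simp), pvChunks_eq_cons hc hch]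
      simp only [List.flatMap_cons]
      rw [pvChunks_take (show (0:Nat) < 2 by norm_num) c (a :: t),
          pvChunks_drop (show (0:Nat) < 2 by norm_num) c (a :: t),
          ih ((a :: t).drop (2 * c)) (by simp only [List.length_drop, List.length_cons] at hp ⊢; omega)]

-- the two paddings agree: A's even-pad + '00'-chunk-pad = B's right-aligned windows' total pad
theorem pvPadArith (n : Nat) {c : Nat} (hc : 0 < c) :
    2 * ((-(((n + n % 2 + 1) / 2 : Nat) : Int)) % (c : Int)).toNat + n % 2
      = ((-(n : Int)) % ((2 * c : Nat) : Int)).toNat := by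
  set k : Nat := (n + n % 2 + 1) / 2 with hkdef
  have hk2 : 2 * k = n + n % 2 := by omega
  have hcz : (c : Int) ≠ 0 := by exact_mod_cast hc.ne'
  set u : Int := (-(k : Int)) % (c : Int) with hu
  have hu0 : 0 ≤ u := Int.emod_nonneg _ hcz
  have huc : u < c := Int.emod_lt_of_pos _ (by exact_mod_cast hc)
  have h1 : u ≡ -(k : Int) [ZMOD (c : Int)] := Int.emod_emod_of_dvd _ dvd_rfl
  have h2 : (2:Int) * u ≡ 2 * (-(k : Int)) [ZMOD 2 * (c : Int)] := h1.mul_left' (c := 2)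
  have h3 : (2:Int) * u + ((n % 2 : Nat) : Int) ≡ 2 * (-(k : Int)) + ((n % 2 : Nat) : Int)
      [ZMOD 2 * (c : Int)] := h2.add_right _
  have h4 : (2:Int) * (-(k : Int)) + ((n % 2 : Nat) : Int) = -(n : Int) := by omega
  rw [h4] at h3
  have h3' : ((2:Int) * u + ((n % 2 : Nat) : Int)) % (2 * (c : Int))
      = (-(n : Int)) % (2 * (c : Int)) := h3
  have hcast : ((2 * c : Nat) : Int) = 2 * (c : Int) := by push_cast; ring
  have h5 : (-(n : Int)) % ((2 * c : Nat) : Int) = 2 * u + ((n % 2 : Nat) : Int) := by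
    rw [hcast, ← h3']
    exact Int.emod_eq_of_lt (by omega) (by omega)
  rw [h5]
  omega

theorem pvFlatMapMap {α β γ : Type} (l : List α) (f : α → β) (g : β → List γ) :
    l.flatMap (fun x => g (f x)) = (l.map f).flatMap g := by
  induction l with
  | nil => rfl
  | cons a t ih => simp only [List.flatMap_cons, List.map_cons, ih]

theorem pvNegRange (K : Nat) (s : Int) (hs : s < 0) :
    PySem.List.pyRange 0 (K : Int) s = [] := by
  rw [PySem.List.pyRange_of_neg _ _ hs, if_neg (by omega : ¬ (K : Int) < 0)]
  simp

theorem pvPosRangeNil (K : Nat) (s : Int) (hs : 0 < s) :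
    PySem.List.pyRange (K : Int) 0 s = [] := by
  rw [PySem.List.pyRange_of_pos _ _ hs, if_neg (by omega : ¬ (K : Int) < 0)]
  simp

theorem pvNegMod {K cn : Int} (h : 0 < cn) :
    (-K) % cn = if K % cn = 0 then 0 else cn - K % cn := by
  by_cases hz : K % cn = 0
  · rw [if_pos hz]
    have hd : cn ∣ K := Int.dvd_of_emod_eq_zero hz
    exact Int.emod_eq_zero_of_dvd (dvd_neg.mpr hd)
  · rw [if_neg hz]
    have h1 : 0 < K % cn := lt_of_le_of_ne (Int.emod_nonneg _ h.ne') (Ne.symm hz)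
    have h2 : K % cn < cn := Int.emod_lt_of_pos _ h
    have hmeq : (cn - K % cn) % cn = (-K) % cn := by
      have e1 : (cn - K % cn) % cn = (cn - K) % cn := by
        rw [Int.sub_emod, Int.emod_emod_of_dvd _ dvd_rfl, ← Int.sub_emod]
      have e2 : cn - K = -K + cn * 1 := by ring
      rw [e1, e2, Int.add_mul_emod_self_left]
    rw [← hmeq, Int.emod_eq_of_lt (by omega) (by omega)]

-- ''.join with empty separator is flatten
theorem pvJoinNil (l : List (List Char)) : PySem.Chars.join [] l = l.flatten := by
  induction l with
  | nil => rfl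
  | cons a t ih =>
    cases t with
    | nil => simp [PySem.Chars.join_singleton]
    | cons b u =>
      rw [PySem.Chars.join_cons_cons]
      simp [ih]

theorem pvFlattenFlatMap {α β : Type} (l : List α) (f : α → List (List β)) :
    (l.flatMap f).flatten = (l.map (fun x => (f x).flatten)).flatten := by
  induction l with
  | nil => rfl
  | cons a t ih => simp [List.flatMap_cons, ih]

theorem pvDropTakeTwo {α : Type} (l : List α) (m : Nat) (h : m + 1 < l.length) :
    (l.drop m).take 2 = [l[m], l[m + 1]] := by
  rw [List.drop_eq_getElem_cons (show m < l.length by omega), List.drop_eq_getElem_cons h]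
  rfl

theorem pvRevMapRange {α : Type} (k : Nat) (f : Nat → α) :
    ((List.range k).map f).reverse = (List.range k).map (fun i => f (k - 1 - i)) := by
  apply List.ext_getElem
  · simp
  · intro i h1 h2
    simp only [List.getElem_reverse, List.getElem_map, List.getElem_range, List.length_map,
      List.length_range]

-- the inner generator on a full window u: reverse-and-swap = reversed byte pairs of u
theorem pvInner (cn : Nat) (hcn : 0 < cn) (u : List Char) (hu : u.length = 2 * cn) :
    (PySem.List.pyRange 0 ((2 * cn : Nat) : Int) 2).map
        (fun j => [PySem.List.pyGetD u.reverse (j + 1) '0', PySem.List.pyGetD u.reverse j '0'])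
      = (pvChunks 2 u).reverse := by
  have hc0 : (0:Int) < (cn : Int) := by exact_mod_cast hcn
  rw [PySem.List.pyRange_of_pos _ _ (show (0:Int) < 2 by norm_num)]
  have hcount : (if (0:Int) < ((2 * cn : Nat) : Int) then ((((2 * cn : Nat) : Int) - 0 + 2 - 1) / 2).toNat else 0) = cn := by
    rw [if_pos (by omega)]
    have e : (((2 * cn : Nat) : Int) - 0 + 2 - 1) = 2 * (cn : Int) + 1 := by push_cast; ring
    rw [e]
    omega
  rw [hcount]
  apply List.ext_getElem
  · simp only [List.length_map, List.length_range, List.length_reverse]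
    rw [pvChunks_length (show (0:Nat) < 2 by norm_num), hu]
    omega
  · intro t h1 h2
    simp only [List.getElem_map, List.getElem_range, List.getElem_reverse]
    have ht : t < cn := by simpa using h1
    have hclen : (pvChunks 2 u).length = cn := by
      rw [pvChunks_length (show (0:Nat) < 2 by norm_num), hu]
      omega
    simp only [hclen]
    have hrl : u.reverse.length = 2 * cn := by simp [hu]
    have eIdx1 : (0 : Int) + 2 * (t : Int) + 1 = ((2 * t + 1 : Nat) : Int) := by push_cast; ring
    have eIdx0 : (0 : Int) + 2 * (t : Int) = ((2 * t : Nat) : Int) := by push_cast; ring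
    rw [eIdx1, eIdx0, PySem.List.pyGetD_natCast, PySem.List.pyGetD_natCast,
        List.getD_eq_getElem _ _ (by rw [hrl]; omega),
        List.getD_eq_getElem _ _ (by rw [hrl]; omega)]
    have h2' : t < (pvChunks 2 u).length := by simpa using h2
    rw [pvChunks_getElem (show (0:Nat) < 2 by norm_num) u (cn - 1 - t)
          (by rw [hclen]; omega),
        pvDropTakeTwo u (2 * (cn - 1 - t)) (by omega)]
    have e1 : u.length - 1 - (2 * t + 1) = 2 * (cn - 1 - t) := by omega
    have e2 : u.length - 1 - 2 * t = 2 * (cn - 1 - t) + 1 := by omega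
    simp only [List.getElem_reverse, e1, e2]

-- B's reversed piece list is the window-chunk decomposition of A's padded string
theorem pvBside (h : List Char) (cn q k : Nat) (hcn : 0 < cn)
    (hq : (q : Int) = (-(h.length : Int)) % (2 * (cn : Int)))
    (hk : q + h.length = 2 * cn * k) :
    ((PySem.List.pyRange (h.length : Int) 0 (-(2 * (cn : Int)))).map
        (fun i => pieceOf h (2 * (cn : Int)) i)).reverse
      = (pvChunks (2 * cn) (List.replicate q '0' ++ h)).map
          (fun u => ((pvChunks 2 u).reverse).flatten) := by
  have hcast : (2 * (cn : Int)) = ((2 * cn : Nat) : Int) := by push_cast; ring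
  have hw0 : 0 < 2 * cn := by omega
  have hqw : q < 2 * cn := by
    have := Int.emod_lt_of_pos (-(h.length : Int)) (show (0:Int) < 2 * (cn : Int) by omega)
    omega
  by_cases hn : h.length = 0
  · have hq0 : q = 0 := by
      have : (q : Int) = 0 := by rw [hq, hn]; simp
      omega
    have hnil : h = [] := List.eq_nil_of_length_eq_zero hn
    subst hnil
    rw [PySem.List.pyRange_of_neg _ _ (by omega)]
    simp [hq0, pvChunks]
  · have hn0 : 0 < h.length := by omega
    have hk1 : 1 ≤ k := by
      rcases Nat.eq_zero_or_pos k with h0 | h1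
      · rw [h0, Nat.mul_zero] at hk; omega
      · exact h1
    have hkc : (q : Int) + (h.length : Int) = 2 * (cn : Int) * (k : Int) := by
      exact_mod_cast hk
    rw [PySem.List.pyRange_of_neg _ _ (by omega)]
    have hcount : (if (0:Int) < (h.length : Int) then
        (((h.length : Int) - 0 + -(-(2 * (cn : Int))) - 1) / -(-(2 * (cn : Int)))).toNat else 0) = k := by
      rw [if_pos (by exact_mod_cast hn0)]
      have e1 : ((h.length : Int) - 0 + -(-(2 * (cn : Int))) - 1)
          = (2 * (cn : Int) - 1 - q) + (k : Int) * (2 * (cn : Int)) := by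
        linear_combination hkc
      have e2 : (-(-(2 * (cn : Int)))) = 2 * (cn : Int) := by ring
      rw [e1, e2, Int.add_mul_ediv_right _ _ (by omega : (2 * (cn : Int)) ≠ 0),
          Int.ediv_eq_zero_of_lt (by omega) (by omega)]
      omega
    rw [hcount, List.map_map, pvRevMapRange]
    apply List.ext_getElem
    · simp only [List.length_map, List.length_range]
      rw [pvChunks_length hw0]
      simp only [List.length_append, List.length_replicate]
      rw [show q + h.length = 2 * cn * k from hk,
          show 2 * cn * k + 2 * cn - 1 = 2 * cn * k + (2 * cn - 1) by omega,
          Nat.mul_add_div hw0, Nat.div_eq_of_lt (by omega)]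
      omega
    · intro i h1 h2
      have hik : i < k := by simpa using h1
      simp only [List.getElem_map, List.getElem_range, Function.comp_apply]
      -- index arithmetic for the window ending at i' = len - w*(k-1-i)
      have hm : ((k - 1 - i : Nat) : Int) = (k : Int) - 1 - (i : Int) := by omega
      have hmul : 2 * cn * i + 2 * cn ≤ 2 * cn * k := by
        calc 2 * cn * i + 2 * cn = 2 * cn * (i + 1) := by ring
        _ ≤ 2 * cn * k := Nat.mul_le_mul_left _ (by omega)
      have hmulc : ((2 * cn * i : Nat) : Int) + ((2 * cn : Nat) : Int) ≤ 2 * (cn : Int) * (k : Int) := by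
        exact_mod_cast hmul
      have hi' : (h.length : Int) + -(2 * (cn : Int)) * ((k - 1 - i : Nat) : Int)
          = ((2 * cn * i : Nat) : Int) + ((2 * cn : Nat) : Int) - (q : Int) := by
        rw [hm]
        push_cast
        linear_combination hkc
      rw [hi']
      set i' : Int := ((2 * cn * i : Nat) : Int) + ((2 * cn : Nat) : Int) - (q : Int) with hi'def
      -- the right-hand chunk
      have h2' : i < (pvChunks (2 * cn) (List.replicate q '0' ++ h)).length := by simpa using h2
      rw [pvChunks_getElem hw0 _ i h2']
      simp only [pieceOf]
      by_cases hcase : q ≤ 2 * cn * i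
      · -- full window: no padding needed
        have emax : max (i' - 2 * (cn : Int)) 0 = ((2 * cn * i - q : Nat) : Int) := by
          rw [hi'def, hcast]
          omega
        have eend : i' = ((2 * cn * i - q : Nat) : Int) + ((2 * cn : Nat) : Int) := by
          rw [hi'def]
          omega
        rw [emax, eend, PySem.List.slice_natCast_add]
        have hwin : (h.drop (2 * cn * i - q)).take (2 * cn) =
            ((List.replicate q '0' ++ h).drop (2 * cn * i)).take (2 * cn) := by
          rw [List.drop_append, List.drop_replicate, show q - 2 * cn * i = 0 by omega]
          simp
        have hwlen : ((h.drop (2 * cn * i - q)).take (2 * cn)).length = 2 * cn := by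
          simp only [List.length_take, List.length_drop]
          omega
        rw [hwin]
        set u := ((List.replicate q '0' ++ h).drop (2 * cn * i)).take (2 * cn) with hudef
        have hulen : u.length = 2 * cn := by rw [← hwin]; exact hwlen
        have hpad : (2 * (cn : Int)).toNat - u.length = 0 := by
          rw [hulen, hcast, Int.toNat_natCast]
          omega
        rw [hpad]
        simp only [List.replicate_zero, List.nil_append]
        rw [hcast, pvInner cn hcn u hulen, pvJoinNil]
      · -- leftmost short window: right-justified with q zeros
        have hi0 : i = 0 := by
          by_contra hne
          have : 2 * cn ≤ 2 * cn * i := Nat.le_mul_of_pos_right _ (by omega)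
          omega
        subst hi0
        simp only [Nat.mul_zero, List.drop_zero] at *
        have emax : max (i' - 2 * (cn : Int)) 0 = 0 := by
          rw [hi'def]
          simp only [Nat.cast_zero, zero_add]
          omega
        have eend : i' = ((2 * cn - q : Nat) : Int) := by
          rw [hi'def]
          simp only [Nat.cast_zero, zero_add]
          omega
        rw [emax, eend]
        have hslice : PySem.List.slice h (some 0) (some ((2 * cn - q : Nat) : Int))
            = h.take (2 * cn - q) := by
          rw [PySem.List.slice_zero_start, PySem.List.slice_to_natCast]
        rw [hslice]
        have hlenh : 2 * cn - q ≤ h.length := by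
          have : 2 * cn ≤ 2 * cn * k := Nat.le_mul_of_pos_right _ (by omega)
          omega
        have hwlen : (h.take (2 * cn - q)).length = 2 * cn - q := by
          simp only [List.length_take]
          omega
        have hpad : (2 * (cn : Int)).toNat - (h.take (2 * cn - q)).length = q := by
          rw [hwlen, hcast, Int.toNat_natCast]
          omega
        rw [hpad]
        have hu : List.replicate q '0' ++ h.take (2 * cn - q)
            = (List.replicate q '0' ++ h).take (2 * cn) := by
          rw [List.take_append, List.take_replicate, List.length_replicate,
              show min (2 * cn) q = q by omega]
        rw [hu]
        have hulen : ((List.replicate q '0' ++ h).take (2 * cn)).length = 2 * cn := by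
          simp only [List.length_take, List.length_append, List.length_replicate]
          omega
        rw [hcast, pvInner cn hcn _ hulen, pvJoinNil]

theorem pvMain_neg (hexstr : String) (c : Int) (hneg : c < 0) :
    flip_endian hexstr c = flip_endian_alt hexstr c := by
  simp only [flip_endian, flip_endian_alt]
  rw [pvNegRange _ c hneg, pvPosRangeNil _ _ (by omega : (0:Int) < -(2 * c))]
  simp [pyLstrip0, PySem.Chars.join]

theorem pvMain_pos (hexstr : String) (cn : Nat) (hcn : 0 < cn) :
    flip_endian hexstr (cn : Int) = flip_endian_alt hexstr (cn : Int) := by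
  have hcpos : (0:Int) < (cn : Int) := by exact_mod_cast hcn
  have h2cpos : (0:Int) < 2 * (cn : Int) := by omega
  simp only [flip_endian, flip_endian_alt]
  set l : List Char := hexstr.toList with hl
  set h0 : List Char :=
    (if PySem.Chars.startswith l ['0', 'x'] then PySem.List.slice l (some 2) none else l) with hh0
  -- A's parity padding as one replicate
  rw [PySem.Int.mod_eq_emod_of_pos (b := 2) (by norm_num)]
  have he : (if ((h0.length : Int)) % 2 ≠ 0 then '0' :: h0 else h0)
      = List.replicate (h0.length % 2) '0' ++ h0 := by
    by_cases hp : h0.length % 2 = 0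
    · rw [if_neg (by omega), hp]
      simp
    · rw [if_pos (by omega), show h0.length % 2 = 1 by omega]
      simp
  rw [he]
  set e : List Char := List.replicate (h0.length % 2) '0' ++ h0 with hedef
  -- A's byte list is the pair chunking of e
  have hms2 := pvMapSliceRange (show (0:Nat) < 2 by norm_num) e
  push_cast at hms2
  rw [hms2]
  -- B's total pad count
  set q : Nat := ((-(h0.length : Int)) % (2 * (cn : Int))).toNat with hqd
  have hq' : (q : Int) = (-(h0.length : Int)) % (2 * (cn : Int)) :=
    Int.toNat_of_nonneg (Int.emod_nonneg _ (by omega))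
  set p : List Char := List.replicate q '0' ++ h0 with hpdef
  -- A's padded byte list equals the pair chunking of B's conceptually padded string
  have hKval : (pvChunks 2 e).length = (h0.length + h0.length % 2 + 1) / 2 := by
    rw [pvChunks_length (show (0:Nat) < 2 by norm_num)]
    simp only [hedef, List.length_append, List.length_replicate]
    omega
  have hPadA := pvPadArith h0.length hcn
  push_cast at hPadA
  rw [PySem.Int.mod_eq_emod_of_pos (b := (cn:Int)) hcpos]
  have hbytes : (if ((pvChunks 2 e).length : Int) % (cn:Int) ≠ 0
      then PySem.List.pyRepeat [(['0','0'] : List Char)]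
            ((cn:Int) - ((pvChunks 2 e).length : Int) % (cn:Int)) ++ pvChunks 2 e
      else pvChunks 2 e) = pvChunks 2 p := by
    have hunify : ∀ (padN : Nat), (padN : Int) = (-((pvChunks 2 e).length : Int)) % (cn:Int) →
        List.replicate padN (['0','0'] : List Char) ++ pvChunks 2 e = pvChunks 2 p := by
      intro padN hdef
      rw [← pvChunks_replicate_zero_pairs, hpdef, hedef, ← List.append_assoc,
          ← List.replicate_add]
      have harith : 2 * padN + h0.length % 2 = q := by
        have hdef' : (padN : Int)
            = (-(((h0.length + h0.length % 2 + 1) / 2 : Nat) : Int)) % (cn:Int) := by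
          rw [hdef, hKval]
        push_cast at hdef'
        omega
      rw [harith]
    by_cases hz : ((pvChunks 2 e).length : Int) % (cn:Int) = 0
    · rw [if_neg (by simp [hz])]
      have h0pad := hunify 0 (by rw [pvNegMod hcpos, if_pos hz]; simp)
      simpa using h0pad
    · rw [if_pos (by simp [hz]), PySem.List.pyRepeat_singleton]
      refine hunify _ ?_
      rw [pvNegMod hcpos, if_neg hz]
      have h1 : 0 ≤ ((pvChunks 2 e).length : Int) % (cn:Int) :=
        Int.emod_nonneg _ hcpos.ne'
      have h2 : ((pvChunks 2 e).length : Int) % (cn:Int) < cn :=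
        Int.emod_lt_of_pos _ hcpos
      rw [Int.toNat_of_nonneg (by omega)]
  rw [hbytes]
  -- A's loop as a flat map over the chunk decomposition
  rw [PySem.List.foldl_append_eq_flatMap]
  simp only [List.nil_append]
  rw [pvFlatMapMap _ (fun i => PySem.List.slice (pvChunks 2 p) (some i) (some (i + (cn:Int))))
        List.reverse,
      pvMapSliceRange hcn (pvChunks 2 p), pvFlatEq hcn p]
  -- k := number of windows
  have hsum : ((q : Int) + h0.length) % (2 * (cn : Int)) = 0 := by
    rw [hq', Int.emod_add_emod]
    simp
  have hdvdn : (2 * cn) ∣ (q + h0.length) := by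
    have hd : (2 * (cn : Int)) ∣ ((q : Int) + (h0.length : Int)) :=
      Int.dvd_of_emod_eq_zero hsum
    have hd' : ((2 * cn : Nat) : Int) ∣ (((q + h0.length : Nat)) : Int) := by
      push_cast
      exact hd
    exact_mod_cast hd'
  obtain ⟨k, hk⟩ := hdvdn
  -- B's loop as a map, then pvBside
  rw [PySem.List.foldl_append_singleton_eq_map]
  simp only [List.nil_append]
  rw [pvBside h0 cn q k hcn hq' hk]
  rw [pvJoinNil]
  rw [pvJoinNil]
  rw [pvFlattenFlatMap]

-- ===== VERDICT (by name: the statement is the Claim_ definition above) =====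
theorem flip_endian_spec : Claim_equal_flip_endian := by
  intro hexstr c _ hpre
  unfold Spec_flip_endian
  rcases lt_trichotomy c 0 with hneg | hzero | hpos
  · exact pvMain_neg hexstr c hneg
  · exact absurd hzero hpre
  · obtain ⟨cn, rfl⟩ : ∃ cn : Nat, c = (cn : Int) := ⟨c.toNat, (Int.toNat_of_nonneg hpos.le).symm⟩
    exact pvMain_pos hexstr cn (by exact_mod_cast hpos)
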